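-- pv_equiv track=rewrite | github.com/Dannycurl02/PyANSYS_ML | Compare Surrogate/compare_architectures.py | extract_input_params_from_doe
-- ===== SOURCE A (Python) =====
-- def extract_input_params_from_doe(doe_config, sim_id):
--     """
--     Extract input parameters for a given simulation ID from DOE configuration.
--
--     Parameters
--     ----------
--     doe_config : dict
--         DOE configuration from model_setup.json
--     sim_id : int
--         Simulation ID (0-based index into DOE grid)
--
--     Returns
--     -------
--     list
--         List of input parameter values
--     """
--     # Flatten DOE configuration into ordered list of parameters
--     all_params = []
--     param_ranges = []
--
--     for bc_name, params in sorted(doe_config.items()):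
--         for param_name, values in sorted(params.items()):
--             if values:  # Non-empty list
--                 all_params.append((bc_name, param_name))
--                 param_ranges.append(values)
--
--     # DOE grid is full factorial - convert linear index to multi-index
--     if not param_ranges:
--         return []
--
--     # Calculate multi-index from linear sim_id
--     multi_index = []
--     remaining = sim_id
--
--     for param_values in reversed(param_ranges):
--         n_values = len(param_values)
--         multi_index.append(remaining % n_values)
--         remaining //= n_values
--
--     multi_index = list(reversed(multi_index))
--
--     # Extract actual values
--     input_values = []
--     for idx, param_values in zip(multi_index, param_ranges):
--         input_values.append(param_values[idx])
--
--     return input_values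
-- ===== SOURCE B (Python) =====
-- def _pick(ranges, sim_id):
--     """Value at each position by direct digit extraction: the weight of a
--     position is the product of the lengths of all later ranges."""
--     if not ranges:
--         return []
--     vals = ranges[0]
--     weight = 1
--     for r in ranges[1:]:
--         weight *= len(r)
--     return [vals[(sim_id // weight) % len(vals)]] + _pick(ranges[1:], sim_id)
--
--
-- def extract_input_params_from_doe(doe_config, sim_id):
--     param_ranges = [values
--                     for _, params in sorted(doe_config.items())
--                     for _, values in sorted(params.items())
--                     if values]
--     return _pick(param_ranges, sim_id)
-- ===== Notes on version B (the rewrite author's own statement) =====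
-- stated objective: alternative
-- what changed: Replaces A's two-pass mixed-radix decode (reversed loop threading a remainder to build multi_index, then a zip extraction pass) by a comprehension-built flatten and a recursive picker that extracts each position's value directly as values[(sim_id // weight) % len] with weight = product of later range lengths.
import Mathlib
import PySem

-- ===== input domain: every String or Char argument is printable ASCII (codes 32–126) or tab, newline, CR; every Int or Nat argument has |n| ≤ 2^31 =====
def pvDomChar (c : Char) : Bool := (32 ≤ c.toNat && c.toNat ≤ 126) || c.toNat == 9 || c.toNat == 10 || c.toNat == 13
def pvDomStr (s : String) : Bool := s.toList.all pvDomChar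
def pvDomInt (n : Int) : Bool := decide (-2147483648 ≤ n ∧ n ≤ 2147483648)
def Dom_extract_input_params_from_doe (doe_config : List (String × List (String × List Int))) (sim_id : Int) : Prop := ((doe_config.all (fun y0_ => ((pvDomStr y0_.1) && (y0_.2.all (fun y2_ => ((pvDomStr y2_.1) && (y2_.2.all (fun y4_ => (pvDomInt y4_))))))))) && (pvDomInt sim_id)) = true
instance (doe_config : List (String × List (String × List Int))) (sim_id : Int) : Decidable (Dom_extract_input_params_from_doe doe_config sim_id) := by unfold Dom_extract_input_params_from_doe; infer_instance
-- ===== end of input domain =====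

-- ===== PORT A =====
-- B replaces A's reversed remainder-threading pass (+ multi_index zip pass) by
-- direct per-position digit extraction with suffix-product weights (objective: alternative).
-- Port note: `param_values[idx]` uses pyGetD with default 0; it is exact because
-- idx = remaining % len(param_values) with len > 0, hence 0 ≤ idx < len.
def extract_input_params_from_doe (doe_config : List (String × List (String × List Int))) (sim_id : Int) : List Int :=
  let st := (PySem.List.sorted (PySem.Dict.ofList doe_config).items (fun p => p.1) false).foldl
      (fun (st : List (String × String) × List (List Int)) bc =>
        (PySem.List.sorted (PySem.Dict.ofList bc.2).items (fun p => p.1) false).foldl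
          (fun st p => if p.2 ≠ [] then (st.1 ++ [(bc.1, p.1)], st.2 ++ [p.2]) else st) st)
      ([], [])
  let param_ranges := st.2
  if param_ranges = [] then []
  else
    let mr := param_ranges.reverse.foldl
        (fun (mr : List Int × Int) vs =>
          (mr.1 ++ [PySem.Int.mod mr.2 (vs.length : Int)], PySem.Int.floordiv mr.2 (vs.length : Int)))
        ([], sim_id)
    let multi_index := mr.1.reverse
    (multi_index.zip param_ranges).map (fun p => PySem.List.pyGetD p.2 p.1 0)

-- ===== PORT B =====
-- weight = product of len(r) over the later ranges (Source B's `for r in ranges[1:]` loop)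
def pvProdLens (rs : List (List Int)) : Int := rs.foldl (fun acc r => acc * (r.length : Int)) 1

-- Source B's recursive _pick; vals[...] is exact via pyGetD as in port A
def pvPick : List (List Int) → Int → List Int
  | [], _ => []
  | vals :: rest, sim_id =>
      PySem.List.pyGetD vals (PySem.Int.mod (PySem.Int.floordiv sim_id (pvProdLens rest)) (vals.length : Int)) 0
        :: pvPick rest sim_id

def extract_input_params_from_doe_alt (doe_config : List (String × List (String × List Int))) (sim_id : Int) : List Int :=
  let param_ranges := (PySem.List.sorted (PySem.Dict.ofList doe_config).items (fun p => p.1) false).flatMap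
      (fun bc => ((PySem.List.sorted (PySem.Dict.ofList bc.2).items (fun p => p.1) false).filter
          (fun p => decide (p.2 ≠ []))).map (·.2))
  pvPick param_ranges sim_id

-- ===== PRECONDITION & SPEC =====
def Spec_extract_input_params_from_doe (doe_config : List (String × List (String × List Int))) (sim_id : Int) (out : List Int) : Prop := out = extract_input_params_from_doe_alt doe_config sim_id
instance (doe_config : List (String × List (String × List Int))) (sim_id : Int) (out : List Int) : Decidable (Spec_extract_input_params_from_doe doe_config sim_id out) := by unfold Spec_extract_input_params_from_doe; infer_instance

-- ===== CLAIM (what is proved, stated in full; the proofs are below) =====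
def Claim_equal_extract_input_params_from_doe : Prop := ∀ (doe_config : List (String × List (String × List Int))) (sim_id : Int), Dom_extract_input_params_from_doe doe_config sim_id → Spec_extract_input_params_from_doe doe_config sim_id (extract_input_params_from_doe doe_config sim_id)

-- ===== LEMMAS AND PROOFS =====

-- A's inner flatten loop: second component is the filtered values, appended
theorem pv_inner_snd (bc1 : String) (l : List (String × List Int)) (st : List (String × String) × List (List Int)) :
    (l.foldl (fun st p => if p.2 ≠ [] then (st.1 ++ [(bc1, p.1)], st.2 ++ [p.2]) else st) st).2
      = st.2 ++ (l.filter (fun p => decide (p.2 ≠ []))).map (·.2) := by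
  induction l generalizing st with
  | nil => simp
  | cons h t ih =>
    rw [List.foldl_cons, ih]
    by_cases hh : h.2 = [] <;> simp [hh]

-- A's outer flatten loop: second component is B's flatMap, appended
theorem pv_outer_snd (l : List (String × List (String × List Int))) (st : List (String × String) × List (List Int)) :
    (l.foldl
        (fun (st : List (String × String) × List (List Int)) bc =>
          (PySem.List.sorted (PySem.Dict.ofList bc.2).items (fun p => p.1) false).foldl
            (fun st p => if p.2 ≠ [] then (st.1 ++ [(bc.1, p.1)], st.2 ++ [p.2]) else st) st) st).2
      = st.2 ++ l.flatMap (fun bc => ((PySem.List.sorted (PySem.Dict.ofList bc.2).items (fun p => p.1) false).filter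
          (fun p => decide (p.2 ≠ []))).map (·.2)) := by
  induction l generalizing st with
  | nil => simp
  | cons h t ih =>
    simp only [List.foldl_cons, List.flatMap_cons, ih, pv_inner_snd]
    simp

-- recursive form of A's digit/remainder loop
def pvDigits : List (List Int) → Int → List Int
  | [], _ => []
  | vs :: t, r => PySem.Int.mod r (vs.length : Int) :: pvDigits t (PySem.Int.floordiv r (vs.length : Int))

def pvRem : List (List Int) → Int → Int
  | [], r => r
  | vs :: t, r => pvRem t (PySem.Int.floordiv r (vs.length : Int))

theorem pv_foldl_digits (l : List (List Int)) (mi : List Int) (r : Int) :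
    l.foldl (fun (mr : List Int × Int) vs =>
        (mr.1 ++ [PySem.Int.mod mr.2 (vs.length : Int)], PySem.Int.floordiv mr.2 (vs.length : Int))) (mi, r)
      = (mi ++ pvDigits l r, pvRem l r) := by
  induction l generalizing mi r with
  | nil => simp [pvDigits, pvRem]
  | cons vs t ih => simp [List.foldl_cons, pvDigits, pvRem, ih]

theorem pv_digits_append (xs ys : List (List Int)) (r : Int) :
    pvDigits (xs ++ ys) r = pvDigits xs r ++ pvDigits ys (pvRem xs r) := by
  induction xs generalizing r with
  | nil => simp [pvDigits, pvRem]
  | cons vs t ih => simp [pvDigits, pvRem, ih]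

theorem pv_prodLens_eq (rs : List (List Int)) : pvProdLens rs = (rs.map (fun r => (r.length : Int))).prod := by
  have h : ∀ (l : List (List Int)) (a : Int), l.foldl (fun acc r => acc * (r.length : Int)) a
      = a * (l.map (fun r => (r.length : Int))).prod := by
    intro l
    induction l with
    | nil => simp
    | cons vs t ih => intro a; simp [List.foldl_cons, ih, mul_assoc]
  simpa using h rs 1

theorem pv_prodLens_pos (rs : List (List Int)) (h : ∀ v ∈ rs, v ≠ []) : 0 < pvProdLens rs := by
  rw [pv_prodLens_eq]
  induction rs with
  | nil => simp
  | cons vs t ih =>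
    have hvs : vs ≠ [] := h vs (by simp)
    have : 0 < (vs.length : Int) := by
      have := List.length_pos_iff.mpr hvs
      exact_mod_cast this
    have ht := ih (fun v hv => h v (List.mem_cons_of_mem _ hv))
    simp only [List.map_cons, List.prod_cons]
    positivity

theorem pv_rem_eq (rs : List (List Int)) (r : Int) (h : ∀ v ∈ rs, v ≠ []) :
    pvRem rs r = PySem.Int.floordiv r (pvProdLens rs) := by
  induction rs generalizing r with
  | nil => simp [pvRem, pvProdLens, PySem.Int.floordiv]
  | cons vs t ih =>
    have hvs : (0 : Int) < (vs.length : Int) := by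
      have := List.length_pos_iff.mpr (h vs (by simp))
      exact_mod_cast this
    have ht : ∀ v ∈ t, v ≠ [] := fun v hv => h v (List.mem_cons_of_mem _ hv)
    have htp := pv_prodLens_pos t ht
    have hp : pvProdLens (vs :: t) = (vs.length : Int) * pvProdLens t := by
      simp [pv_prodLens_eq]
    rw [pvRem, ih _ ht, hp,
      PySem.Int.floordiv_eq_ediv_of_pos hvs,
      PySem.Int.floordiv_eq_ediv_of_pos htp,
      PySem.Int.floordiv_eq_ediv_of_pos (by positivity)]
    exact Int.ediv_ediv_of_nonneg (le_of_lt hvs)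

theorem pv_prodLens_reverse (rs : List (List Int)) : pvProdLens rs.reverse = pvProdLens rs := by
  simp [pv_prodLens_eq, List.map_reverse, List.prod_reverse]

-- the heart: A's reversed-digit extraction equals B's weighted picking
theorem pv_main (rs : List (List Int)) (r : Int) (h : ∀ v ∈ rs, v ≠ []) :
    ((pvDigits rs.reverse r).reverse.zip rs).map (fun p => PySem.List.pyGetD p.2 p.1 0)
      = pvPick rs r := by
  induction rs generalizing r with
  | nil => simp [pvDigits, pvPick]
  | cons vs t ih =>
    have ht : ∀ v ∈ t, v ≠ [] := fun v hv => h v (List.mem_cons_of_mem _ hv)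
    have hrev : (vs :: t).reverse = t.reverse ++ [vs] := by simp
    rw [hrev, pv_digits_append]
    have htrev : ∀ v ∈ t.reverse, v ≠ [] := by simpa using ht
    rw [pv_rem_eq _ _ htrev, pv_prodLens_reverse]
    simp only [pvDigits, List.reverse_append, List.reverse_cons, List.reverse_nil,
      List.nil_append, List.cons_append]
    simp only [List.zip_cons_cons, List.map_cons, pvPick]
    rw [ih _ ht]

-- membership in B's flatten gives nonempty value lists
theorem pv_flat_nonempty (doe_config : List (String × List (String × List Int))) :
    ∀ v ∈ (PySem.List.sorted (PySem.Dict.ofList doe_config).items (fun p => p.1) false).flatMap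
      (fun bc => ((PySem.List.sorted (PySem.Dict.ofList bc.2).items (fun p => p.1) false).filter
          (fun p => decide (p.2 ≠ []))).map (·.2)), v ≠ [] := by
  intro v hv
  simp only [List.mem_flatMap, List.mem_map, List.mem_filter] at hv
  obtain ⟨bc, _, p, ⟨_, hp⟩, hpv⟩ := hv
  subst hpv
  simpa using hp

-- ===== VERDICT (by name: the statement is the Claim_ definition above) =====
theorem extract_input_params_from_doe_spec : Claim_equal_extract_input_params_from_doe := by
  intro doe_config sim_id _
  unfold Spec_extract_input_params_from_doe extract_input_params_from_doe extract_input_params_from_doe_alt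
  simp only []
  rw [pv_outer_snd]
  set rs := (PySem.List.sorted (PySem.Dict.ofList doe_config).items (fun p => p.1) false).flatMap
      (fun bc => ((PySem.List.sorted (PySem.Dict.ofList bc.2).items (fun p => p.1) false).filter
          (fun p => decide (p.2 ≠ []))).map (·.2)) with hrs
  have hne := pv_flat_nonempty doe_config
  rw [← hrs] at hne
  by_cases hempty : rs = []
  · simp [hempty, pvPick]
  · simp only [List.nil_append, if_neg hempty]
    rw [pv_foldl_digits]
    exact pv_main rs sim_id hne
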